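-- pv_equiv track=rewrite | github.com/NHALX/llio | src/league/database/generator/ll_inibin.py | readBitfield
-- ===== SOURCE A (Python) =====
-- def readByte(mm, index):
--     x = mm[index]
--
--     if type(x) == type(''):
--         return ord(x)
--     else:
--         return mm[index]
--
-- def readBitfield(mm, index, count):
--     extra = count % 8
--     n     = count // 8
--     results = []
--
--     def extract(bits, bc):
--         for b in range(0, bc):
--             results.append(bool(bits & 0x1))
--             bits >>= 1
--
--     for i in range(0, n):
--         extract(readByte(mm,index+i), 8)
--
--     if extra:
--         extract(readByte(mm,index+n), extra)
--         return (results, n + 1)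
--     else:
--         return (results, n)
-- ===== SOURCE B (Python) =====
-- def readByte(mm, index):
--     x = mm[index]
--
--     if type(x) == type(''):
--         return ord(x)
--     else:
--         return mm[index]
--
-- def readBitfield(mm, index, count):
--     results = [bool(readByte(mm, index + i // 8) >> (i % 8) & 1) for i in range(count)]
--     return (results, (count + 7) // 8)
-- ===== Notes on version B (the rewrite author's own statement) =====
-- stated objective: simpler
-- what changed: Replaces A's inner `extract` helper with its shifting accumulator and the n-full-bytes/extra-bits two-branch structure by one flat per-bit comprehension that indexes the containing byte as readByte(mm, index + i//8) >> (i%8), returning the closed-form byte count (count+7)//8.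
-- intended difference: On a negative count not divisible by 8, A returns count%8 (1..7) bits read from the byte before index with byte count count//8+1, while B returns ([], (count+7)//8); an empty bit list for a non-positive bit count is the intended behaviour. — e.g. on readBitfield([7], 0, -3): A returns ([true, true, true, false, false], 0), B returns ([], 0)
import Mathlib
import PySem

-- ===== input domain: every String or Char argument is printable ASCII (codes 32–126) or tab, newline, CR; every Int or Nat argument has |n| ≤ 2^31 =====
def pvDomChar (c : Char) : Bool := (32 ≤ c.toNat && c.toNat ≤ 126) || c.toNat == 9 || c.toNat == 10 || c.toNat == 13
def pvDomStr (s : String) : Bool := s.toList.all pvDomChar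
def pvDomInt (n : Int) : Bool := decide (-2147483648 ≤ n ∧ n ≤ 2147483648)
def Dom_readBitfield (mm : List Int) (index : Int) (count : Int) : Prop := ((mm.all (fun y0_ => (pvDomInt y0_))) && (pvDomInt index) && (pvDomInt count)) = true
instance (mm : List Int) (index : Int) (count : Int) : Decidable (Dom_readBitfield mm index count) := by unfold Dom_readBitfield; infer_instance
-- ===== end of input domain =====

-- B replaces A's inner `extract` helper and the n/extra two-branch structure by one flat
-- per-bit loop with closed-form index arithmetic (objective: simpler; same O(count) cost).

-- ===== PORT A =====
-- readByte: mm : List Int holds no strings, so Python's `type(x) == type('')` branch never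
-- fires; mm[index] is pyGet? (negative index from the end); none = IndexError, excluded by
-- Pre_, so the .getD 0 default is unreachable under Pre_.
def readByte (mm : List Int) (index : Int) : Int :=
  (PySem.List.pyGet? mm index).getD 0

-- A's inner helper `extract(bits, bc)`: appends bc low bits of bits to results, halving bits.
def pvExtract (bits : Int) (bc : Int) (results : List Bool) : List Bool :=
  ((PySem.List.pyRange 0 bc 1).foldl
    (fun (st : List Bool × Int) _ =>
      (st.1 ++ [decide (PySem.Int.band st.2 1 ≠ 0)], st.2 >>> (1 : Nat)))
    (results, bits)).1

def readBitfield (mm : List Int) (index : Int) (count : Int) : List Bool × Int :=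
  let extra := PySem.Int.mod count 8
  let n := PySem.Int.floordiv count 8
  let results :=
    (PySem.List.pyRange 0 n 1).foldl
      (fun res i => pvExtract (readByte mm (index + i)) 8 res) []
  if extra ≠ 0 then
    (pvExtract (readByte mm (index + n)) extra results, n + 1)
  else
    (results, n)

-- ===== PORT B =====
def readBitfield_alt (mm : List Int) (index : Int) (count : Int) : List Bool × Int :=
  ((PySem.List.pyRange 0 count 1).map
     (fun i =>
       decide (PySem.Int.band
         (readByte mm (index + PySem.Int.floordiv i 8) >>> (PySem.Int.mod i 8).toNat) 1 ≠ 0)),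
   PySem.Int.floordiv (count + 7) 8)

-- ===== PRECONDITION & SPEC =====
-- Pre_ excludes exactly the inputs where A's mm[...] raises IndexError: every byte index A
-- touches (index+i for i in range(count//8), plus index+count//8 when count%8 != 0) must be
-- a valid Python index of mm.
def Pre_readBitfield (mm : List Int) (index : Int) (count : Int) : Prop :=
  (∀ k ∈ PySem.List.pyRange 0 (PySem.Int.floordiv count 8) 1,
      PySem.Raise.InRange mm.length (index + k)) ∧
  (PySem.Int.mod count 8 ≠ 0 →
      PySem.Raise.InRange mm.length (index + PySem.Int.floordiv count 8))
instance (mm : List Int) (index : Int) (count : Int) : Decidable (Pre_readBitfield mm index count) := by unfold Pre_readBitfield; infer_instance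

def pvWitness_readBitfield : List Int × Int × Int := ([5, 130], 0, 11)

-- On a negative count not divisible by 8, A returns count % 8 (Python-floor, so 1..7) bits read
-- from the byte BEFORE index with byte count count//8 + 1, while B returns ([], (count+7)//8):
-- no bits for a non-positive bit count is the intended behaviour, A's bits are leftover loop
-- arithmetic applied outside the natural domain of a count.
def D_readBitfield (mm : List Int) (index : Int) (count : Int) : Prop :=
  count < 0 ∧ PySem.Int.mod count 8 ≠ 0
instance (mm : List Int) (index : Int) (count : Int) : Decidable (D_readBitfield mm index count) := by unfold D_readBitfield; infer_instance

def Spec_readBitfield (mm : List Int) (index : Int) (count : Int) (out : List Bool × Int) : Prop := ¬ D_readBitfield mm index count → out = readBitfield_alt mm index count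
instance (mm : List Int) (index : Int) (count : Int) (out : List Bool × Int) : Decidable (Spec_readBitfield mm index count out) := by unfold Spec_readBitfield; infer_instance

def pvDiffWitness_readBitfield : List Int × Int × Int := ([7], 0, -3)
def pvDiffWitnessOut_readBitfield : (List Bool × Int) × (List Bool × Int) :=
  (([true, true, true, false, false], 0), ([], 0))

-- ===== CLAIM (what is proved, stated in full; the proofs are below) =====
def Claim_unchanged_readBitfield : Prop := ∀ (mm : List Int) (index : Int) (count : Int), Dom_readBitfield mm index count → Pre_readBitfield mm index count → Spec_readBitfield mm index count (readBitfield mm index count)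
def Claim_changed_readBitfield : Prop := Dom_readBitfield (pvDiffWitness_readBitfield.1) (pvDiffWitness_readBitfield.2.1) (pvDiffWitness_readBitfield.2.2) ∧ Pre_readBitfield (pvDiffWitness_readBitfield.1) (pvDiffWitness_readBitfield.2.1) (pvDiffWitness_readBitfield.2.2) ∧ D_readBitfield (pvDiffWitness_readBitfield.1) (pvDiffWitness_readBitfield.2.1) (pvDiffWitness_readBitfield.2.2) ∧ readBitfield (pvDiffWitness_readBitfield.1) (pvDiffWitness_readBitfield.2.1) (pvDiffWitness_readBitfield.2.2) = pvDiffWitnessOut_readBitfield.1 ∧ readBitfield_alt (pvDiffWitness_readBitfield.1) (pvDiffWitness_readBitfield.2.1) (pvDiffWitness_readBitfield.2.2) = pvDiffWitnessOut_readBitfield.2 ∧ pvDiffWitnessOut_readBitfield.1 ≠ pvDiffWitnessOut_readBitfield.2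
def Claim_exact_readBitfield : Prop := ∀ (mm : List Int) (index : Int) (count : Int), Dom_readBitfield mm index count → Pre_readBitfield mm index count → D_readBitfield mm index count → readBitfield mm index count ≠ readBitfield_alt mm index count

-- ===== LEMMAS AND PROOFS =====


-- the per-bit value both programs compute for absolute bit position i (as a Nat)
def pvBit (mm : List Int) (index : Int) (i : Nat) : Bool :=
  decide (PySem.Int.band (readByte mm (index + (i / 8 : Nat)) >>> (i % 8)) 1 ≠ 0)

theorem pvExtract_state (bits : Int) (bc : Nat) (res : List Bool) :
    (List.range bc).foldl
      (fun (st : List Bool × Int) (_ : Nat) =>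
        (st.1 ++ [decide (PySem.Int.band st.2 1 ≠ 0)], st.2 >>> (1 : Nat)))
      (res, bits)
    = (res ++ (List.range bc).map (fun (k : Nat) => decide (PySem.Int.band (bits >>> k) 1 ≠ 0)),
       bits >>> bc) := by
  induction bc generalizing res with
  | zero => simp
  | succ m ih =>
      rw [List.range_succ, List.foldl_append, ih]
      simp [Int.shiftRight_add]

theorem pvExtract_eq (bits : Int) (bc : Nat) (res : List Bool) :
    pvExtract bits (bc : Int) res
    = res ++ (List.range bc).map (fun (k : Nat) => decide (PySem.Int.band (bits >>> k) 1 ≠ 0)) := by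
  unfold pvExtract
  rw [PySem.List.pyRange_zero_nat, List.foldl_map, pvExtract_state bits bc res]

theorem pvBytes_eq (mm : List Int) (index : Int) (n : Nat) :
    (List.range n).foldl
      (fun res (i : Nat) => pvExtract (readByte mm (index + (i : Int))) 8 res) []
    = (List.range (8 * n)).map (pvBit mm index) := by
  induction n with
  | zero => simp
  | succ m ih =>
      rw [List.range_succ, List.foldl_append]
      simp only [List.foldl_cons, List.foldl_nil, ih]
      have he := pvExtract_eq (readByte mm (index + (m : Int))) 8
        ((List.range (8 * m)).map (pvBit mm index))
      norm_cast at he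
      rw [he, show 8 * (m + 1) = 8 * m + 8 by ring, List.range_add, List.map_append]
      congr 1
      rw [List.map_map]
      apply List.map_congr_left
      intro k hk
      simp only [List.mem_range] at hk
      simp only [Function.comp, pvBit]
      have h1 : (8 * m + k) / 8 = m := by omega
      have h2 : (8 * m + k) % 8 = k := by omega
      rw [h1, h2]

-- B's mapped function at a Nat position i is pvBit
theorem pvAlt_fun_eq (mm : List Int) (index : Int) (i : Nat) :
    (decide (PySem.Int.band
       (readByte mm (index + PySem.Int.floordiv (i : Int) 8) >>> (PySem.Int.mod (i : Int) 8).toNat) 1 ≠ 0))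
    = pvBit mm index i := by
  unfold pvBit
  rw [show PySem.Int.floordiv (i : Int) 8 = ((i / 8 : Nat) : Int) from by
        exact_mod_cast PySem.Int.floordiv_natCast i 8,
      show PySem.Int.mod (i : Int) 8 = ((i % 8 : Nat) : Int) from by
        exact_mod_cast PySem.Int.mod_natCast i 8,
      Int.toNat_natCast]

theorem readBitfield_spec_aux (mm : List Int) (index : Int) (c : Nat) :
    readBitfield mm index (c : Int) = readBitfield_alt mm index (c : Int) := by
  simp only [readBitfield, readBitfield_alt]
  rw [show PySem.Int.mod (c : Int) 8 = ((c % 8 : Nat) : Int) from by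
        exact_mod_cast PySem.Int.mod_natCast c 8,
      show PySem.Int.floordiv (c : Int) 8 = ((c / 8 : Nat) : Int) from by
        exact_mod_cast PySem.Int.floordiv_natCast c 8,
      show PySem.Int.floordiv ((c : Int) + 7) 8 = (((c + 7) / 8 : Nat) : Int) from by
        rw [show ((c : Int) + 7) = ((c + 7 : Nat) : Int) by push_cast; ring]
        exact_mod_cast PySem.Int.floordiv_natCast (c + 7) 8]
  rw [PySem.List.pyRange_zero_nat, PySem.List.pyRange_zero_nat]
  rw [List.foldl_map, List.map_map]
  rw [show ((List.range c).map
        ((fun i =>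
          decide (PySem.Int.band
            (readByte mm (index + PySem.Int.floordiv i 8) >>> (PySem.Int.mod i 8).toNat) 1 ≠ 0))
          ∘ (fun (k : Nat) => (k : Int))))
      = (List.range c).map (pvBit mm index) from
        List.map_congr_left (fun i _ => pvAlt_fun_eq mm index i)]
  rw [pvBytes_eq mm index (c / 8)]
  by_cases h : c % 8 = 0
  · rw [if_neg (by omega), Prod.mk.injEq]
    refine ⟨?_, ?_⟩
    · rw [show 8 * (c / 8) = c by omega]
    · congr 1; omega
  · rw [if_pos (by omega), Prod.mk.injEq]
    refine ⟨?_, ?_⟩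
    · rw [pvExtract_eq]
      conv_rhs => rw [← Nat.div_add_mod c 8]
      rw [List.range_add, List.map_append]
      congr 1
      rw [List.map_map]
      apply List.map_congr_left
      intro k hk
      simp only [List.mem_range] at hk
      simp only [Function.comp, pvBit]
      have h1 : (8 * (c / 8) + k) / 8 = c / 8 := by omega
      have h2 : (8 * (c / 8) + k) % 8 = k := by omega
      rw [h1, h2]
    · push_cast
      omega


-- A=B also on a negative count divisible by 8: both return ([], count//8)
theorem pv_neg_mult8 (mm : List Int) (index : Int) (count : Int)
    (hneg : count < 0) (h8 : PySem.Int.mod count 8 = 0) :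
    readBitfield mm index count = readBitfield_alt mm index count := by
  have hd : PySem.Int.floordiv count 8 = count / 8 :=
    PySem.Int.floordiv_eq_ediv_of_pos (by norm_num)
  have hd7 : PySem.Int.floordiv (count + 7) 8 = (count + 7) / 8 :=
    PySem.Int.floordiv_eq_ediv_of_pos (by norm_num)
  have hdvd : (8 : Int) ∣ count := (PySem.Int.mod_eq_zero_iff_dvd count 8).1 h8
  simp only [readBitfield, readBitfield_alt, h8]
  rw [if_neg (by simp)]
  rw [PySem.List.pyRange_one_eq_nil (by rw [hd]; omega),
      PySem.List.pyRange_one_eq_nil (by omega : count ≤ 0)]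
  simp only [List.foldl_nil, List.map_nil]
  rw [hd, hd7]
  congr 1
  omega

-- ===== VERDICT (by name: the statement is the Claim_ definition above) =====
theorem readBitfield_spec : Claim_unchanged_readBitfield := by
  intro mm index count _ _ hnd
  by_cases hc : 0 ≤ count
  · rw [show count = ((count.toNat : Nat) : Int) by omega]
    exact readBitfield_spec_aux mm index count.toNat
  · have h8 : PySem.Int.mod count 8 = 0 := by
      by_contra hm
      exact hnd ⟨by omega, hm⟩
    exact pv_neg_mult8 mm index count (by omega) h8

theorem readBitfield_changed : Claim_changed_readBitfield := by
  unfold Claim_changed_readBitfield; decide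

theorem readBitfield_tight : Claim_exact_readBitfield := by
  intro mm index count _ _ hd heq
  obtain ⟨hneg, hm⟩ := hd
  have hdv : PySem.Int.floordiv count 8 = count / 8 :=
    PySem.Int.floordiv_eq_ediv_of_pos (by norm_num)
  have hm0 : 0 ≤ PySem.Int.mod count 8 := PySem.Int.mod_nonneg count (by norm_num)
  simp only [readBitfield, readBitfield_alt] at heq
  rw [if_pos hm] at heq
  rw [PySem.List.pyRange_one_eq_nil (by rw [hdv]; omega),
      PySem.List.pyRange_one_eq_nil (by omega : count ≤ 0)] at heq
  simp only [List.foldl_nil, List.map_nil] at heq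
  have hfst := congrArg (fun p => p.1.length) heq
  rw [show PySem.Int.mod count 8 = (((PySem.Int.mod count 8).toNat : Nat) : Int) by omega,
      pvExtract_eq] at hfst
  simp at hfst
  simp [PySem.Int.mod_eq_emod_of_pos] at hm
  omega
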